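-- pv_equiv track=rewrite | github.com/gwu-zymo/dynamodb_scripts | pull_pbv_multirun.py | modify_taxonomy_name
-- ===== SOURCE A (Python) =====
-- def modify_taxonomy_name(species):
--     split = species.split(';')
--     header = [split[0][0:4].replace('__', '_')]
--     tail = []
--     count = 0
--     for i in range(len(split)-1, -1, -1):
--         if (not 'Other' in split[i]) and (not 'NA' in split[i]) and (not 'bacterium' in split[i]):
--             tail.append(split[i].replace('__', '_'))
--             count = count + 1
--         if count == 2:
--             break
--
--     tail.reverse()
--     new_species = '_'.join(header + tail)
--     return(new_species)
-- ===== SOURCE B (Python) =====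
-- def modify_taxonomy_name(species):
--     split = species.split(';')
--     valid = [s.replace('__', '_') for s in split
--              if 'Other' not in s and 'NA' not in s and 'bacterium' not in s]
--     return '_'.join([split[0][0:4].replace('__', '_')] + valid[-2:])
-- ===== Notes on version B (the rewrite author's own statement) =====
-- stated objective: simpler
-- what changed: Replaces the reverse index scan with counter, early break and final reverse by a single forward filter-map comprehension followed by valid[-2:].
import Mathlib
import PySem

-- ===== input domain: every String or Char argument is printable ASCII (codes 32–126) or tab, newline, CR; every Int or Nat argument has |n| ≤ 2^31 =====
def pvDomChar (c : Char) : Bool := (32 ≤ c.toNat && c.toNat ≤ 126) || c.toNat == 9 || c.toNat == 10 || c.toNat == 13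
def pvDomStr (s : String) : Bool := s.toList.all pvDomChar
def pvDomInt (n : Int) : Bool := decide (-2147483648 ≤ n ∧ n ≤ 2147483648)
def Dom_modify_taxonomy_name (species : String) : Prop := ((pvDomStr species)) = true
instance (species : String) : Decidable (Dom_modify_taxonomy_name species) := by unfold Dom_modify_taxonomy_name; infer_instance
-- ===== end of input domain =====

-- B replaces A's reverse index scan with counter, early break and final reverse
-- by a forward filter-map comprehension followed by valid[-2:] (objective: simpler).

-- ===== PORT A =====
-- shared helpers: the segment test and the '__' -> '_' replacement both Pythons perform
def pvOk (s : String) : Bool :=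
  !(PySem.Str.isIn "Other" s) && !(PySem.Str.isIn "NA" s) && !(PySem.Str.isIn "bacterium" s)

def pvRep (s : String) : String := PySem.Str.replace s "__" "_"

-- A's loop: 'for i in range(len(split)-1, -1, -1)' with state (tail, count) and 'break' at count == 2
-- (split[i] via pyGet?; the '.getD ""' never fires: every index pyRange produces is in range)
def pvLoopA (split : List String) : List Int → List String → Int → List String
  | [], tail, _ => tail
  | i :: rest, tail, count =>
    let seg := (PySem.List.pyGet? split i).getD ""
    if pvOk seg then
      let tail' := tail ++ [pvRep seg]
      let count' := count + 1
      if count' == 2 then tail' else pvLoopA split rest tail' count'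
    else
      if count == 2 then tail else pvLoopA split rest tail count

-- species.split(';') : ';' is non-empty, so split? always returns some; '.getD []' never fires
def modify_taxonomy_name (species : String) : String :=
  let split := (PySem.Str.split? species ";").getD []
  let header := [pvRep (PySem.Str.slice ((PySem.List.pyGet? split 0).getD "") (some 0) (some 4))]
  let tail := pvLoopA split (PySem.List.pyRange ((split.length : Int) - 1) (-1) (-1)) [] 0
  PySem.Str.join "_" (header ++ tail.reverse)

-- ===== PORT B =====
def modify_taxonomy_name_alt (species : String) : String :=
  let split := (PySem.Str.split? species ";").getD []
  let valid := (split.filter pvOk).map pvRep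
  PySem.Str.join "_"
    ([pvRep (PySem.Str.slice ((PySem.List.pyGet? split 0).getD "") (some 0) (some 4))]
      ++ PySem.List.slice valid (some (-2)) none)

-- ===== PRECONDITION & SPEC =====
def Spec_modify_taxonomy_name (species : String) (out : String) : Prop := out = modify_taxonomy_name_alt species
instance (species : String) (out : String) : Decidable (Spec_modify_taxonomy_name species out) := by unfold Spec_modify_taxonomy_name; infer_instance

-- ===== CLAIM (what is proved, stated in full; the proofs are below) =====
def Claim_equal_modify_taxonomy_name : Prop := ∀ (species : String), Dom_modify_taxonomy_name species → Spec_modify_taxonomy_name species (modify_taxonomy_name species)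

-- ===== LEMMAS AND PROOFS =====

-- proof-only helper: A's loop re-read as structural recursion over the reversed segment list
def pvLoopB : List String → List String → Int → List String
  | [], tail, _ => tail
  | s :: rest, tail, count =>
    if pvOk s then
      if count + 1 == 2 then tail ++ [pvRep s] else pvLoopB rest (tail ++ [pvRep s]) (count + 1)
    else
      if count == 2 then tail else pvLoopB rest tail count

theorem pvLoopA_take : ∀ (xs : List String) (n : Nat), n ≤ xs.length → ∀ (tail : List String) (count : Int),
    pvLoopA xs ((List.range n).map (fun (k : Nat) => (n : Int) - 1 - (k : Int))) tail count
      = pvLoopB (xs.take n).reverse tail count := by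
  intro xs n
  induction n generalizing xs with
  | zero => intro _ tail count; simp [pvLoopA, pvLoopB]
  | succ m ih =>
    intro h tail count
    have hm : m < xs.length := h
    have hcons : (List.range (m + 1)).map (fun (k : Nat) => ((m + 1 : Nat) : Int) - 1 - (k : Int))
        = ((m : Nat) : Int) :: (List.range m).map (fun (k : Nat) => ((m : Nat) : Int) - 1 - (k : Int)) := by
      rw [List.range_succ_eq_map]
      simp only [List.map_cons, List.map_map]
      congr 1
      · push_cast; ring
      · apply List.map_congr_left; intro k _; simp [Function.comp]; ring
    have htake : (xs.take (m + 1)).reverse = xs[m] :: (xs.take m).reverse := by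
      rw [List.take_add_one, List.getElem?_eq_getElem hm]
      simp
    rw [hcons, htake]
    have hget : (PySem.List.pyGet? xs ((m : Nat) : Int)).getD "" = xs[m] := by
      rw [PySem.List.pyGet?_natCast, List.getElem?_eq_getElem hm]; rfl
    simp only [pvLoopA, pvLoopB, hget]
    split
    · split
      · rfl
      · exact ih xs (le_of_lt hm) _ _
    · split
      · rfl
      · exact ih xs (le_of_lt hm) _ _

theorem pvLoopB_spec : ∀ (rl tail : List String) (count : Int), count = 0 ∨ count = 1 →
    pvLoopB rl tail count = tail ++ ((rl.filter pvOk).take (2 - count.toNat)).map pvRep := by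
  intro rl
  induction rl with
  | nil => intro tail count _; simp [pvLoopB]
  | cons s rest ih =>
    intro tail count hc
    simp only [pvLoopB]
    by_cases hok : pvOk s
    · simp only [hok, if_pos]
      rcases hc with h0 | h1
      · subst h0
        rw [if_neg (by decide), show (0 : Int) + 1 = 1 from rfl, ih _ 1 (Or.inr rfl)]
        simp [hok]
      · subst h1
        rw [if_pos (by decide)]
        simp [hok]
    · simp only [hok, Bool.false_eq_true, if_false]
      have : ¬ (count == 2) = true := by
        rcases hc with h | h <;> subst h <;> decide
      rw [if_neg this, ih _ count hc]
      simp [hok]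

theorem pv_key (xs : List String) :
    (pvLoopA xs (PySem.List.pyRange ((xs.length : Int) - 1) (-1) (-1)) [] 0).reverse
      = PySem.List.slice ((xs.filter pvOk).map pvRep) (some (-2)) none := by
  have hrange : PySem.List.pyRange ((xs.length : Int) - 1) (-1) (-1)
      = (List.range xs.length).map (fun (k : Nat) => ((xs.length : Nat) : Int) - 1 - (k : Int)) := by
    rw [PySem.List.pyRange_neg_one]
    have : ((xs.length : Int) - 1 - (-1)).toNat = xs.length := by omega
    rw [this]
  rw [hrange, pvLoopA_take xs xs.length le_rfl [] 0, List.take_length,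
    pvLoopB_spec _ _ 0 (Or.inl rfl)]
  have hslice : PySem.List.slice ((xs.filter pvOk).map pvRep) (some (-2)) none
      = ((xs.filter pvOk).map pvRep).drop (((xs.filter pvOk).map pvRep).length - 2) := by
    rw [PySem.List.slice_some_none]
    rw [show ((-2 : Int)) = -(OfNat.ofNat 2) from rfl, PySem.List.clampIdx_neg_ofNat _ 2 (by omega)]
  rw [hslice]
  rw [List.filter_reverse, List.take_reverse]
  simp [List.map_drop]

-- ===== VERDICT (by name: the statement is the Claim_ definition above) =====
theorem modify_taxonomy_name_spec : Claim_equal_modify_taxonomy_name := by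
  intro species _
  unfold Spec_modify_taxonomy_name modify_taxonomy_name modify_taxonomy_name_alt
  simp only [pv_key]
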